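-- pv_equiv track=rewrite | github.com/maeyoung/hyeyoung | programmers/mock_test.py | solution
-- ===== SOURCE A (Python) =====
-- from itertools import cycle
--
-- def solution(answers):
--     answer = []
--
--     a = [1, 2, 3, 4, 5]
--     b = [2, 1, 2, 3, 2, 4, 2, 5]
--     c = [3, 3, 1, 1, 2, 2, 4, 4, 5, 5]
--     score_list = [0,0,0]
--
--     for ans_a, ans_b, ans_c, real_ans in zip(cycle(a), cycle(b), cycle(c), answers):
--         if ans_a == real_ans: score_list[0] += 1
--         if ans_b == real_ans: score_list[1] += 1
--         if ans_c == real_ans: score_list[2] += 1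
--
--     for who, score in enumerate(score_list):
--         if score == max(score_list):
--             answer.append(who+1)
--
--     return answer
-- ===== SOURCE B (Python) =====
-- def solution(answers):
--     # Aggregate once: histogram of (position mod 40, answer); 40 = lcm of the
--     # three pattern periods, so each candidate's score is a closed sum over
--     # the 40 residue buckets instead of a per-element pattern comparison.
--     pats = [[1, 2, 3, 4, 5],
--             [2, 1, 2, 3, 2, 4, 2, 5],
--             [3, 3, 1, 1, 2, 2, 4, 4, 5, 5]]
--     hist = {}
--     for i, x in enumerate(answers):
--         k = (i % 40, x)
--         hist[k] = hist.get(k, 0) + 1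
--     scores = [sum(hist.get((r, p[r % len(p)]), 0) for r in range(40))
--               for p in pats]
--     best = max(scores)
--     return [i + 1 for i, s in enumerate(scores) if s == best]
-- ===== Notes on version B (the rewrite author's own statement) =====
-- stated objective: alternative
-- what changed: B first aggregates answers into a histogram keyed by (index mod 40, value) (40 = lcm of the three pattern periods) and then computes each candidate's score as a closed sum over the 40 residue buckets, instead of A's fused cycle-zip pass comparing every answer against all three patterns.
import Mathlib
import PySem

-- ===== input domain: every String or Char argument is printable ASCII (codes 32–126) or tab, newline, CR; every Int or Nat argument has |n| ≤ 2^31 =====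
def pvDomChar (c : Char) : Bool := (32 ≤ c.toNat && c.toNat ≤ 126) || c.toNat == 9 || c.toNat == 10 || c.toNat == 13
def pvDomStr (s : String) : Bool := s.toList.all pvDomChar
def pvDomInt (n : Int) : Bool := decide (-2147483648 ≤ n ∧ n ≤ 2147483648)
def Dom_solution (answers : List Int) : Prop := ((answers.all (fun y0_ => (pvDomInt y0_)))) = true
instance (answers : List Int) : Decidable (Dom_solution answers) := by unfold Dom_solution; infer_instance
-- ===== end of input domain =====

-- B replaces A's fused cycle-zip pass by aggregate-then-score: one histogram keyed by
-- (index mod 40, answer) (40 = lcm of the pattern periods), then each candidate's score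
-- is a closed sum over the 40 residue buckets (objective: alternative algorithm).

-- ===== PORT A =====
-- A's patterns; cycle(p) paired with answers is ported as p[i % len(p)] at enumerate index i
def pvA : List Int := [1, 2, 3, 4, 5]
def pvB : List Int := [2, 1, 2, 3, 2, 4, 2, 5]
def pvC : List Int := [3, 3, 1, 1, 2, 2, 4, 4, 5, 5]

def solution (answers : List Int) : List Int :=
  let score := (PySem.List.enumerate answers).foldl
    (fun (s : Int × Int × Int) (p : Int × Int) =>
      let s0 := if PySem.List.pyGetD pvA (PySem.Int.mod p.1 5) 0 == p.2 then s.1 + 1 else s.1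
      let s1 := if PySem.List.pyGetD pvB (PySem.Int.mod p.1 8) 0 == p.2 then s.2.1 + 1 else s.2.1
      let s2 := if PySem.List.pyGetD pvC (PySem.Int.mod p.1 10) 0 == p.2 then s.2.2 + 1 else s.2.2
      (s0, s1, s2)) (0, 0, 0)
  let scoreList : List Int := [score.1, score.2.1, score.2.2]
  let m : Int := (PySem.List.max? scoreList (fun x => x)).getD 0
  (PySem.List.enumerate scoreList).foldl
    (fun (acc : List Int) (p : Int × Int) => if p.2 == m then acc ++ [p.1 + 1] else acc) []

-- ===== PORT B =====
def solution_alt (answers : List Int) : List Int :=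
  let pats : List (List Int) :=
    [[1, 2, 3, 4, 5], [2, 1, 2, 3, 2, 4, 2, 5], [3, 3, 1, 1, 2, 2, 4, 4, 5, 5]]
  -- hist[(i % 40, x)] = hist.get((i % 40, x), 0) + 1 over enumerate(answers)
  let hist := (PySem.List.enumerate answers).foldl
    (fun (d : PySem.Dict (Int × Int) Int) (p : Int × Int) =>
      d.insert (PySem.Int.mod p.1 40, p.2) (d.getD (PySem.Int.mod p.1 40, p.2) 0 + 1))
    PySem.Dict.empty
  let scores := pats.map (fun p =>
    ((PySem.List.pyRange 0 40 1).map (fun r =>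
      hist.getD (r, PySem.List.pyGetD p (PySem.Int.mod r (p.length : Int)) 0) 0)).sum)
  let best : Int := (PySem.List.max? scores (fun x => x)).getD 0
  (PySem.List.enumerate scores).filterMap
    (fun q => if q.2 == best then some (q.1 + 1) else none)

-- ===== PRECONDITION & SPEC =====
def Spec_solution (answers : List Int) (out : List Int) : Prop := out = solution_alt answers
instance (answers : List Int) (out : List Int) : Decidable (Spec_solution answers out) := by unfold Spec_solution; infer_instance

-- ===== CLAIM (what is proved, stated in full; the proofs are below) =====
def Claim_equal_solution : Prop := ∀ (answers : List Int), Dom_solution answers → Spec_solution answers (solution answers)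

-- ===== LEMMAS AND PROOFS =====

-- A's fused three-counter fold equals three independent countP's
lemma fold3_eq (l : List (Int × Int)) (c0 c1 c2 : Int) :
    l.foldl
      (fun (s : Int × Int × Int) (p : Int × Int) =>
        let s0 := if PySem.List.pyGetD pvA (PySem.Int.mod p.1 5) 0 == p.2 then s.1 + 1 else s.1
        let s1 := if PySem.List.pyGetD pvB (PySem.Int.mod p.1 8) 0 == p.2 then s.2.1 + 1 else s.2.1
        let s2 := if PySem.List.pyGetD pvC (PySem.Int.mod p.1 10) 0 == p.2 then s.2.2 + 1 else s.2.2
        (s0, s1, s2)) (c0, c1, c2)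
    = (c0 + (l.countP (fun p => PySem.List.pyGetD pvA (PySem.Int.mod p.1 5) 0 == p.2) : Int),
       c1 + (l.countP (fun p => PySem.List.pyGetD pvB (PySem.Int.mod p.1 8) 0 == p.2) : Int),
       c2 + (l.countP (fun p => PySem.List.pyGetD pvC (PySem.Int.mod p.1 10) 0 == p.2) : Int)) := by
  induction l generalizing c0 c1 c2 with
  | nil => simp
  | cons a t ih =>
      simp only [List.foldl_cons, List.countP_cons, ih]
      split_ifs <;>
        exact Prod.ext (by push_cast; ring) (Prod.ext (by push_cast; ring) (by push_cast; ring))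

-- on a nodup list, countP of a predicate that can only hold at m is 0 or 1
lemma countP_eq_of_unique (l : List Int) (hnd : l.Nodup) (m : Int) (hm : m ∈ l)
    (p : Int → Bool) (hp : ∀ r, p r = true → r = m) :
    (l.countP p : Int) = if p m then 1 else 0 := by
  induction l with
  | nil => cases hm
  | cons a t ih =>
      rcases List.nodup_cons.mp hnd with ⟨ha, hndt⟩
      rw [List.countP_cons]
      by_cases hap : a = m
      · subst hap
        have ht : t.countP p = 0 := by
          rw [List.countP_eq_zero]
          intro r hr hpr
          exact ha ((hp r hpr) ▸ hr)
        simp [ht]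
      · have hpa : p a = false := by
          cases h : p a
          · rfl
          · exact absurd (hp a h) hap
        have hmt : m ∈ t := by
          cases List.mem_cons.mp hm with
          | inl h => exact absurd h.symm hap
          | inr h => exact h
        simp [hpa, ih hndt hmt]

-- the histogram sum over the 40 residues counts exactly the matches of f ∘ (· % 40)
lemma sum_count_eq_countP (f : Int → Int) (l : List (Int × Int)) :
    ((PySem.List.pyRange 0 40 1).map (fun r =>
      ((l.map (fun p => (PySem.Int.mod p.1 40, p.2))).count (r, f r) : Int))).sum
    = (l.countP (fun p => f (PySem.Int.mod p.1 40) == p.2) : Int) := by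
  induction l with
  | nil => simp
  | cons a t ih =>
      simp only [List.map_cons, List.count_cons, List.countP_cons]
      have hcast : (fun r : Int =>
          (((t.map (fun p => (PySem.Int.mod p.1 40, p.2))).count (r, f r)
            + if ((PySem.Int.mod a.1 40, a.2) == (r, f r)) then 1 else 0 : Nat) : Int))
        = (fun r : Int =>
          ((t.map (fun p => (PySem.Int.mod p.1 40, p.2))).count (r, f r) : Int)
            + (if ((PySem.Int.mod a.1 40, a.2) == (r, f r)) then (1:Int) else 0)) := by
        funext r
        split_ifs <;> push_cast <;> ring
      rw [hcast, PySem.List.sum_map_add_int (PySem.List.pyRange 0 40 1)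
        (fun r => ((t.map (fun p => (PySem.Int.mod p.1 40, p.2))).count (r, f r) : Int))
        (fun r => if ((PySem.Int.mod a.1 40, a.2) == (r, f r)) then (1:Int) else 0), ih,
        PySem.List.sum_map_ite_one_zero (fun r => ((PySem.Int.mod a.1 40, a.2) == (r, f r)))]
      have hm : PySem.Int.mod a.1 40 ∈ PySem.List.pyRange 0 40 1 := by
        rw [PySem.List.mem_pyRange_one]
        exact ⟨PySem.Int.mod_nonneg a.1 (by norm_num), PySem.Int.mod_lt a.1 (by norm_num)⟩
      rw [countP_eq_of_unique _ (PySem.List.nodup_pyRange_one 0 40) _ hm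
        (fun r => ((PySem.Int.mod a.1 40, a.2) == (r, f r)))
        (by intro r h; simp only [beq_iff_eq, Prod.mk.injEq] at h; exact h.1.symm)]
      have hite : (if ((PySem.Int.mod a.1 40, a.2) == (PySem.Int.mod a.1 40, f (PySem.Int.mod a.1 40))) then (1:Int) else 0)
          = if f (PySem.Int.mod a.1 40) == a.2 then (1:Int) else 0 := by
        simp only [beq_iff_eq, Prod.mk.injEq, true_and]
        by_cases h : f (PySem.Int.mod a.1 40) = a.2 <;> simp [eq_comm]
      rw [hite]
      split_ifs <;> push_cast <;> ring

-- mod 40 then mod L = mod L when L divides 40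
lemma mod_mod_40 (i L : Int) (hL : 0 < L) (hdvd : L ∣ 40) :
    PySem.Int.mod (PySem.Int.mod i 40) L = PySem.Int.mod i L := by
  rw [PySem.Int.mod_eq_emod_of_pos (by norm_num : (0:Int) < 40),
      PySem.Int.mod_eq_emod_of_pos hL, PySem.Int.mod_eq_emod_of_pos hL]
  exact Int.emod_emod_of_dvd i hdvd

-- B's per-pattern histogram score equals A's countP, for each of the three patterns
lemma hist_score_eq (answers : List Int) (pat : List Int) (hL : 0 < (pat.length : Int))
    (hdvd : (pat.length : Int) ∣ 40) :
    ((PySem.List.pyRange 0 40 1).map (fun r =>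
      (((PySem.List.enumerate answers).foldl
        (fun (d : PySem.Dict (Int × Int) Int) (p : Int × Int) =>
          d.insert (PySem.Int.mod p.1 40, p.2) (d.getD (PySem.Int.mod p.1 40, p.2) 0 + 1))
        PySem.Dict.empty).getD
        (r, PySem.List.pyGetD pat (PySem.Int.mod r (pat.length : Int)) 0) 0))).sum
    = ((PySem.List.enumerate answers).countP
        (fun p => PySem.List.pyGetD pat (PySem.Int.mod p.1 (pat.length : Int)) 0 == p.2) : Int) := by
  have hfold :
      (PySem.List.enumerate answers).foldl
        (fun (d : PySem.Dict (Int × Int) Int) (p : Int × Int) =>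
          d.insert (PySem.Int.mod p.1 40, p.2) (d.getD (PySem.Int.mod p.1 40, p.2) 0 + 1))
        PySem.Dict.empty
      = ((PySem.List.enumerate answers).map (fun p => (PySem.Int.mod p.1 40, p.2))).foldl
          (fun (d : PySem.Dict (Int × Int) Int) x => d.insert x (d.getD x 0 + 1))
          PySem.Dict.empty := by
    rw [List.foldl_map]
  rw [hfold]
  have hgetD : ∀ v : Int × Int,
      (((PySem.List.enumerate answers).map (fun p => (PySem.Int.mod p.1 40, p.2))).foldl
        (fun (d : PySem.Dict (Int × Int) Int) x => d.insert x (d.getD x 0 + 1))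
        PySem.Dict.empty).getD v 0
      = (((PySem.List.enumerate answers).map (fun p => (PySem.Int.mod p.1 40, p.2))).count v : Int) := by
    intro v
    rw [PySem.Dict.getD_foldl_insert_add_one]
    simp
  simp only [hgetD]
  rw [sum_count_eq_countP (fun r => PySem.List.pyGetD pat (PySem.Int.mod r (pat.length : Int)) 0)]
  congr 1
  apply List.countP_congr
  intro p _
  rw [mod_mod_40 p.1 _ hL hdvd]

-- the winner-selection over a 3-element score list: A's foldl-append = B's filterMap
lemma select3_eq (s0 s1 s2 m : Int) :
    (PySem.List.enumerate [s0, s1, s2]).foldl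
      (fun (acc : List Int) (p : Int × Int) => if p.2 == m then acc ++ [p.1 + 1] else acc) []
    = (PySem.List.enumerate [s0, s1, s2]).filterMap
      (fun p => if p.2 == m then some (p.1 + 1) else none) := by
  simp [PySem.List.enumerate_cons, PySem.List.enumerate_nil, List.filterMap]
  split_ifs <;> simp

theorem solution_eq_alt (answers : List Int) : solution answers = solution_alt answers := by
  have hf := fold3_eq (PySem.List.enumerate answers) 0 0 0
  simp only [solution, solution_alt]
  rw [hf]
  have h0 := hist_score_eq answers [1, 2, 3, 4, 5] (by norm_num) (by norm_num)
  have h1 := hist_score_eq answers [2, 1, 2, 3, 2, 4, 2, 5] (by norm_num) (by norm_num)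
  have h2 := hist_score_eq answers [3, 3, 1, 1, 2, 2, 4, 4, 5, 5] (by norm_num) (by norm_num)
  simp only [List.map_cons, List.map_nil, List.length_cons, List.length_nil,
    Nat.reduceAdd, Nat.cast_ofNat, zero_add] at h0 h1 h2 ⊢
  simp only [h0, h1, h2, pvA, pvB, pvC]
  exact select3_eq _ _ _ _

-- ===== VERDICT (by name: the statement is the Claim_ definition above) =====
theorem solution_spec : Claim_equal_solution := by
  intro answers _
  unfold Spec_solution
  exact solution_eq_alt answers
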